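-- pv_equiv track=rewrite | github.com/Wonhee0221/programmers_tests | revel_0/삼각형의완성조건(1).py | solution
-- ===== SOURCE A (Python) =====
-- def solution(sides):
--     cnt=0
--     answer = sum(sides)
--     for i in range(max(sides)-min(sides),max(sides)):
--         cnt+=1
--     for x in range(max(sides),answer-1):
--         cnt+=1
--     return cnt
-- ===== SOURCE B (Python) =====
-- def solution(sides):
--     mn = min(sides)
--     mx = max(sides)
--     return max(0, mn) + max(0, sum(sides) - 1 - mx)
-- ===== Notes on version B (the rewrite author's own statement) =====
-- stated objective: faster
-- what changed: replaces the two counting loops by the closed-form lengths of the two ranges: max(0,min) + max(0,sum-1-max)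
import Mathlib
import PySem

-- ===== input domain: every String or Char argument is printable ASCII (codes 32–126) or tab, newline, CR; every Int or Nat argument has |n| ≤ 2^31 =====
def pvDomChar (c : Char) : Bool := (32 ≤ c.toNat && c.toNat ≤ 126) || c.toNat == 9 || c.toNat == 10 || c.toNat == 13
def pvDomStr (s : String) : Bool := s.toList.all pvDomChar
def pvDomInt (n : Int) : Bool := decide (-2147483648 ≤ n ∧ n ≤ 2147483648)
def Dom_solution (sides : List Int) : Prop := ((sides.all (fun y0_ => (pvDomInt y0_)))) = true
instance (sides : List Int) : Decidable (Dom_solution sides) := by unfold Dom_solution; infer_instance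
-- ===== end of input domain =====

-- B replaces A's two counting loops by the closed-form range lengths (asymptotically faster).

-- ===== PORT A =====
def solution (sides : List Int) : Int :=
  let cnt : Int := 0
  let answer := sides.sum
  let mx := (PySem.List.max? sides (fun x => x)).getD 0
  let mn := (PySem.List.min? sides (fun x => x)).getD 0
  let cnt := (PySem.List.pyRange (mx - mn) mx 1).foldl (fun c _ => c + 1) cnt
  let cnt := (PySem.List.pyRange mx (answer - 1) 1).foldl (fun c _ => c + 1) cnt
  cnt

-- ===== PORT B =====
def solution_alt (sides : List Int) : Int :=
  let mn := (PySem.List.min? sides (fun x => x)).getD 0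
  let mx := (PySem.List.max? sides (fun x => x)).getD 0
  max 0 mn + max 0 (sides.sum - 1 - mx)

-- ===== PRECONDITION & SPEC =====
-- A raises ValueError (max of an empty sequence) on []; B raises too.
def Pre_solution (sides : List Int) : Prop := sides ≠ []
instance (sides : List Int) : Decidable (Pre_solution sides) := by unfold Pre_solution; infer_instance
def pvWitness_solution : List Int := ([3, 4, 5])

def Spec_solution (sides : List Int) (out : Int) : Prop := out = solution_alt sides
instance (sides : List Int) (out : Int) : Decidable (Spec_solution sides out) := by unfold Spec_solution; infer_instance

-- ===== CLAIM (what is proved, stated in full; the proofs are below) =====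
def Claim_equal_solution : Prop := ∀ (sides : List Int), Dom_solution sides → Pre_solution sides → Spec_solution sides (solution sides)

-- ===== LEMMAS AND PROOFS =====
theorem foldl_count_int (l : List Int) (init : Int) :
    l.foldl (fun c _ => c + 1) init = init + l.length := by
  induction l generalizing init with
  | nil => simp
  | cons x t ih => simp [List.foldl, ih]; ring

-- ===== VERDICT (by name: the statement is the Claim_ definition above) =====
theorem solution_spec : Claim_equal_solution := by
  intro sides _ hpre
  unfold Spec_solution solution solution_alt
  obtain ⟨mx, hmx⟩ : ∃ m, PySem.List.max? sides (fun x => x) = some m := by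
    cases h : PySem.List.max? sides (fun x => x) with
    | none => exact absurd (((PySem.List.max?_eq_none_iff _ _).mp h)) hpre
    | some m => exact ⟨m, rfl⟩
  obtain ⟨mn, hmn⟩ : ∃ m, PySem.List.min? sides (fun x => x) = some m := by
    cases h : PySem.List.min? sides (fun x => x) with
    | none => exact absurd (((PySem.List.min?_eq_none_iff _ _).mp h)) hpre
    | some m => exact ⟨m, rfl⟩
  simp only [hmx, hmn, Option.getD_some, foldl_count_int, PySem.List.length_pyRange_one]
  omega
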